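-- pv_equiv track=rewrite | github.com/dorinbadea/RedAudit | redaudit/core/scanner/enrichment.py | _extract_http_server
-- ===== SOURCE A (Python) =====
-- def _extract_http_server(headers: str) -> str:
--     if not headers:
--         return ""
--     server = ""
--     for line in headers.splitlines():
--         if line.lower().startswith("server:"):
--             server = line.split(":", 1)[1].strip()
--     return server[:200] if server else ""
-- ===== SOURCE B (Python) =====
-- def _extract_http_server(headers: str) -> str:
--     if not headers:
--         return ""
--     for line in reversed(headers.splitlines()):
--         if line.lower().startswith("server:"):
--             value = line.split(":", 1)[1].strip()
--             return value[:200] if value else ""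
--     return ""
-- ===== Notes on version B (the rewrite author's own statement) =====
-- stated objective: alternative
-- what changed: replaces the forward keep-overwriting accumulator with a reverse scan that returns on the first (i.e. last) Server header found
import Mathlib
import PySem

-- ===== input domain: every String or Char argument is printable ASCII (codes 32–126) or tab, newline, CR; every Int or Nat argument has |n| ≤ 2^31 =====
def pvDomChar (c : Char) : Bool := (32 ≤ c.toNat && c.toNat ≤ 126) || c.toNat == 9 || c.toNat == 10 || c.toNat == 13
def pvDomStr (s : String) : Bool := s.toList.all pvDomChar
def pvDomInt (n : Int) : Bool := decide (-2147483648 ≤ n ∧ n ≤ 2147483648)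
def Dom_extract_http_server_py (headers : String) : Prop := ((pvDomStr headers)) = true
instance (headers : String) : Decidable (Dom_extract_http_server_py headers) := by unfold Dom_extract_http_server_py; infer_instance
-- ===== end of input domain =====

-- B differs from A only in traversal direction: reverse scan with early return instead of
-- a forward keep-overwriting accumulator; return values are identical.

-- line.split(":", 1)[1].strip()  (shared by both Pythons verbatim; the [1] index cannot
-- raise in either program because the guard ensures the line contains ':', so .getD "" is exact)
def pvServerVal (line : String) : String :=
  PySem.Str.strip ((PySem.List.pyGet? ((PySem.Str.splitMax? line ":" 1).getD []) 1).getD "")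

-- line.lower().startswith("server:")
def pvIsServerLine (line : String) : Bool :=
  PySem.Str.startswith (PySem.Str.lower line) "server:"

-- ===== PORT A =====
def extract_http_server_py (headers : String) : String :=
  if headers = "" then ""
  else
    let server := (PySem.Str.splitlines headers).foldl
      (fun server line => if pvIsServerLine line then pvServerVal line else server) ""
    if server ≠ "" then PySem.Str.slice server none (some 200) else ""

-- ===== PORT B =====
def pvRevScan : List String → String
  | [] => ""
  | line :: rest =>
    if pvIsServerLine line then
      let value := pvServerVal line
      if value ≠ "" then PySem.Str.slice value none (some 200) else ""
    else pvRevScan rest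

def extract_http_server_py_alt (headers : String) : String :=
  if headers = "" then ""
  else pvRevScan (PySem.Str.splitlines headers).reverse

-- ===== PRECONDITION & SPEC =====
def Spec_extract_http_server_py (headers : String) (out : String) : Prop := out = extract_http_server_py_alt headers
instance (headers : String) (out : String) : Decidable (Spec_extract_http_server_py headers out) := by unfold Spec_extract_http_server_py; infer_instance

-- ===== CLAIM (what is proved, stated in full; the proofs are below) =====
def Claim_equal_extract_http_server_py : Prop := ∀ (headers : String), Dom_extract_http_server_py headers → Spec_extract_http_server_py headers (extract_http_server_py headers)

-- ===== LEMMAS AND PROOFS =====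

def pvFinish (s : String) : String :=
  if s ≠ "" then PySem.Str.slice s none (some 200) else ""

lemma pvRevScan_of_no_match (r : List String) (h : r.any pvIsServerLine = false) :
    pvRevScan r = "" := by
  induction r with
  | nil => rfl
  | cons x r ih =>
    simp only [List.any_cons, Bool.or_eq_false_iff] at h
    simp [pvRevScan, h.1, ih h.2]

lemma pvFold_eq_revScan (r : List String) (acc : String) :
    pvFinish (r.reverse.foldl
        (fun server line => if pvIsServerLine line then pvServerVal line else server) acc)
      = if r.any pvIsServerLine then pvRevScan r else pvFinish acc := by
  induction r generalizing acc with
  | nil => simp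
  | cons x r ih =>
    rw [List.reverse_cons, List.foldl_append]
    simp only [List.foldl_cons, List.foldl_nil, List.any_cons]
    by_cases hx : pvIsServerLine x
    · simp only [hx, if_true, Bool.true_or, pvRevScan, pvFinish]
    · simp only [hx, Bool.false_or, ih acc, pvRevScan, Bool.false_eq_true, if_false]

-- ===== VERDICT (by name: the statement is the Claim_ definition above) =====
theorem extract_http_server_py_spec : Claim_equal_extract_http_server_py := by
  intro headers _
  unfold Spec_extract_http_server_py extract_http_server_py extract_http_server_py_alt
  by_cases h : headers = ""
  · simp [h]
  · simp only [h, if_false]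
    have := pvFold_eq_revScan (PySem.Str.splitlines headers).reverse ""
    simp only [List.reverse_reverse] at this
    rw [show (if ((PySem.Str.splitlines headers).foldl
        (fun server line => if pvIsServerLine line then pvServerVal line else server) "") ≠ ""
        then PySem.Str.slice ((PySem.Str.splitlines headers).foldl
        (fun server line => if pvIsServerLine line then pvServerVal line else server) "")
          none (some 200) else "")
        = pvFinish ((PySem.Str.splitlines headers).foldl
        (fun server line => if pvIsServerLine line then pvServerVal line else server) "") from rfl,
      this]
    by_cases hm : ((PySem.Str.splitlines headers).reverse.any pvIsServerLine)
    · simp [hm]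
    · rw [if_neg hm, pvRevScan_of_no_match _ (Bool.eq_false_iff.mpr hm)]
      simp [pvFinish]
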